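-- pv_equiv track=rewrite | github.com/MrBrantCode/unitest_baseline | mut_generate/mist_train_cf/cf_71565/solution.py | calculateVowelCountAndWordDetail
-- ===== SOURCE A (Python) =====
-- def calculateVowelCountAndWordDetail(inputString):
--     # list of vowels
--     vowels = ['a', 'e', 'i', 'o', 'u']
--
--     # convert the string to lowercase
--     inputString = inputString.lower()
--
--     # calculate total vowel and word count
--     vowelCount = 0
--     vowelStartEndWordCount = 0
--     words = inputString.split() # split string into words
--
--     for word in words:
--         for char in word:
--             if char in vowels:
--                 vowelCount += 1
--
--         # check if first and last character of the word are vowels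
--         if word[0] in vowels or word[-1] in vowels:
--             vowelStartEndWordCount += 1
--
--     return (vowelCount, vowelStartEndWordCount)
-- ===== SOURCE B (Python) =====
-- VOWELS = frozenset('aeiou')
--
-- def calculateVowelCountAndWordDetail(inputString):
--     low = inputString.lower()
--     # flat whole-string scan: whitespace contributes no vowels
--     vowelCount = sum(ch in VOWELS for ch in low)
--     vowelStartEndWordCount = sum(
--         1 for w in low.split() if w[0] in VOWELS or w[-1] in VOWELS)
--     return (vowelCount, vowelStartEndWordCount)
-- ===== Notes on version B (the rewrite author's own statement) =====
-- stated objective: simpler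
-- what changed: Replaces the nested word/char loop with two independent passes: a flat whole-string scan counting vowels (whitespace has none) and a per-word generator counting words that start or end with a vowel.
import Mathlib
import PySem

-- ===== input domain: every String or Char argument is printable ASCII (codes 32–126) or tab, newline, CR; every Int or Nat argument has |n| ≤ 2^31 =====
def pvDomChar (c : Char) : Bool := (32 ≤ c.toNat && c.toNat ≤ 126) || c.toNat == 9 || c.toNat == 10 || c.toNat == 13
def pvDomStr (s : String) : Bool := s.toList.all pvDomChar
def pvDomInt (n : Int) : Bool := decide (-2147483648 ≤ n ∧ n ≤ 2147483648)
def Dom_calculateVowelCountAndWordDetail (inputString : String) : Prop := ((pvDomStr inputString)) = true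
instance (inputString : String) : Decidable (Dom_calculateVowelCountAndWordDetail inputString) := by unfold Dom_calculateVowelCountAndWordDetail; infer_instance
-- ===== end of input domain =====

-- B replaces A's single nested word/char loop by two independent passes: a flat
-- whole-string vowel count plus a per-word boundary count (objective: simpler).


-- ===== PORT A =====
-- vowels = ['a', 'e', 'i', 'o', 'u']
def pvVowels : List Char := ['a', 'e', 'i', 'o', 'u']

-- literal port of A: one loop over the words, carrying both counters; word[0] /
-- word[-1] via pyGet? (split() never yields an empty word, so the none branch is dead)
def calculateVowelCountAndWordDetail (inputString : String) : Int × Int :=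
  let s := PySem.Str.lower inputString
  let words := PySem.Str.split₀ s
  words.foldl (fun (st : Int × Int) word =>
    let vc := word.toList.foldl (fun n c => if c ∈ pvVowels then n + 1 else n) st.1
    let vw := if (PySem.Str.pyGet? word 0).any (· ∈ pvVowels)
                 || (PySem.Str.pyGet? word (-1)).any (· ∈ pvVowels)
              then st.2 + 1 else st.2
    (vc, vw)) (0, 0)

-- ===== PORT B =====
-- VOWELS = frozenset('aeiou');  ch in VOWELS
def pvIsVowel (c : Char) : Bool := c ∈ pvVowels

-- w[0] in VOWELS or w[-1] in VOWELS
def pvBoundaryVowel (w : String) : Bool :=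
  (PySem.Str.pyGet? w 0).any pvIsVowel || (PySem.Str.pyGet? w (-1)).any pvIsVowel

def calculateVowelCountAndWordDetail_alt (inputString : String) : Int × Int :=
  let low := PySem.Str.lower inputString
  let vowelCount : Int := (low.toList.countP pvIsVowel : Nat)
  let vowelStartEndWordCount : Int := ((PySem.Str.split₀ low).countP pvBoundaryVowel : Nat)
  (vowelCount, vowelStartEndWordCount)

-- ===== PRECONDITION & SPEC =====
def Spec_calculateVowelCountAndWordDetail (inputString : String) (out : Int × Int) : Prop := out = calculateVowelCountAndWordDetail_alt inputString
instance (inputString : String) (out : Int × Int) : Decidable (Spec_calculateVowelCountAndWordDetail inputString out) := by unfold Spec_calculateVowelCountAndWordDetail; infer_instance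

-- ===== CLAIM (what is proved, stated in full; the proofs are below) =====
def Claim_equal_calculateVowelCountAndWordDetail : Prop := ∀ (inputString : String), Dom_calculateVowelCountAndWordDetail inputString → Spec_calculateVowelCountAndWordDetail inputString (calculateVowelCountAndWordDetail inputString)

-- ===== LEMMAS AND PROOFS =====

-- A's boundary test is B's predicate
theorem pv_boundary_eq (w : String) :
    ((PySem.Str.pyGet? w 0).any (· ∈ pvVowels) || (PySem.Str.pyGet? w (-1)).any (· ∈ pvVowels))
      = pvBoundaryVowel w := rfl

-- inner char loop of A counts vowels
theorem pv_inner_count (l : List Char) (k : Int) :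
    l.foldl (fun n c => if c ∈ pvVowels then n + 1 else n) k = k + (l.countP pvIsVowel : Nat) := by
  induction l generalizing k with
  | nil => simp
  | cons c t ih =>
    simp only [List.foldl, List.countP_cons, pvIsVowel]
    by_cases h : c ∈ pvVowels
    · simp [h, ih]; push_cast; ring
    · simp [h, ih]

-- A's pair fold (inner loop already expressed as a count) splits into the two components
theorem pv_fold_split (ws : List String) (a b : Int) :
    ws.foldl (fun (st : Int × Int) word =>
      (st.1 + ((word.toList.countP pvIsVowel : Nat) : Int),
       if pvBoundaryVowel word then st.2 + 1 else st.2)) (a, b)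
    = (a + ((ws.map (fun w => w.toList.countP pvIsVowel)).sum : Nat),
       b + (ws.countP pvBoundaryVowel : Nat)) := by
  induction ws generalizing a b with
  | nil => simp
  | cons w t ih =>
    simp only [List.foldl, ih, Prod.mk.injEq, List.map_cons, List.sum_cons, List.countP_cons]
    constructor
    · push_cast; ring
    · by_cases h : pvBoundaryVowel w = true <;> simp [h] <;> push_cast <;> ring

-- whitespace characters are never vowels
theorem pv_isspace_not_vowel (c : Char) (h : PySem.Chars.isspace c = true) : pvIsVowel c = false := by
  by_contra hne
  simp only [Bool.not_eq_false, pvIsVowel, decide_eq_true_eq] at hne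
  fin_cases hne <;> simp_all [PySem.Chars.isspace]

-- summing vowel counts over split₀.go recovers the vowel count of the whole remainder
theorem pv_go_sum (s cur : List Char) (acc : List (List Char)) :
    ((PySem.Chars.split₀.go s cur acc).map (List.countP pvIsVowel)).sum
      = (acc.map (List.countP pvIsVowel)).sum + cur.countP pvIsVowel + s.countP pvIsVowel := by
  induction s generalizing cur acc with
  | nil =>
    rw [PySem.Chars.split₀.go]
    by_cases h : cur.isEmpty
    · simp_all [List.isEmpty_iff, List.map_reverse, List.sum_reverse]
    · simp_all [List.isEmpty_iff, List.map_reverse, List.sum_reverse]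
  | cons c t ih =>
    rw [PySem.Chars.split₀.go]
    by_cases hs : PySem.Chars.isspace c = true
    · have hv := pv_isspace_not_vowel c hs
      by_cases h : cur.isEmpty <;>
        simp_all [List.isEmpty_iff, ih, List.countP_cons, List.countP_reverse] <;> omega
    · simp only [hs, Bool.false_eq_true, if_false, ih, List.countP_cons]
      by_cases h : pvIsVowel c = true <;> simp [h] <;> omega

theorem pv_split_sum (s : List Char) :
    ((PySem.Chars.split₀ s).map (List.countP pvIsVowel)).sum = s.countP pvIsVowel := by
  rw [PySem.Chars.split₀]
  simpa using pv_go_sum s [] []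

-- ===== VERDICT (by name: the statement is the Claim_ definition above) =====
theorem calculateVowelCountAndWordDetail_spec : Claim_equal_calculateVowelCountAndWordDetail := by
  intro s _
  unfold Spec_calculateVowelCountAndWordDetail
  unfold calculateVowelCountAndWordDetail calculateVowelCountAndWordDetail_alt
  have hf : (fun (st : Int × Int) word =>
      (word.toList.foldl (fun n c => if c ∈ pvVowels then n + 1 else n) st.1,
       if (PySem.Str.pyGet? word 0).any (· ∈ pvVowels)
          || (PySem.Str.pyGet? word (-1)).any (· ∈ pvVowels)
       then st.2 + 1 else st.2))
    = (fun (st : Int × Int) word =>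
      (st.1 + ((word.toList.countP pvIsVowel : Nat) : Int),
       if pvBoundaryVowel word then st.2 + 1 else st.2)) := by
    funext st word
    rw [pv_inner_count, pv_boundary_eq]
  simp only [hf, pv_fold_split, zero_add, Prod.mk.injEq]
  refine ⟨?_, trivial⟩
  have h := pv_split_sum (PySem.Str.lower s).toList
  rw [← PySem.Str.split₀_map_toList, List.map_map] at h
  rw [← h]
  rfl
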